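-- pv_equiv track=rewrite | github.com/yair-shtern/LeetCode-Questions | LeetCodeProjects/minStepsBalance.py | minStepsBalance
-- ===== SOURCE A (Python) =====
-- def minStepsBalance(piles):
--     sorted_unique_piles = sorted(set(piles), reverse=True)
--     piles_count = []
--     for p in sorted_unique_piles:
--         piles_count.append(piles.count(p))
--
--     answer = 0
--     last_index = len(sorted_unique_piles) - 1
--     for i in range(last_index):
--         answer += piles_count[i] * (last_index - i)
--
--     return answer
-- ===== SOURCE B (Python) =====
-- def minStepsBalance(piles):
--     distinct = set(piles)
--     return sum(1 for p in piles for q in distinct if q < p)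
-- ===== Notes on version B (the rewrite author's own statement) =====
-- stated objective: simpler
-- what changed: Drops the sort and the per-rank count list entirely: B takes the distinct values once and directly sums, for every element p of piles, the number of distinct values strictly below p (a two-line double comprehension), which equals A's sum of count*(rank distance) over the sorted uniques.
import Mathlib
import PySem

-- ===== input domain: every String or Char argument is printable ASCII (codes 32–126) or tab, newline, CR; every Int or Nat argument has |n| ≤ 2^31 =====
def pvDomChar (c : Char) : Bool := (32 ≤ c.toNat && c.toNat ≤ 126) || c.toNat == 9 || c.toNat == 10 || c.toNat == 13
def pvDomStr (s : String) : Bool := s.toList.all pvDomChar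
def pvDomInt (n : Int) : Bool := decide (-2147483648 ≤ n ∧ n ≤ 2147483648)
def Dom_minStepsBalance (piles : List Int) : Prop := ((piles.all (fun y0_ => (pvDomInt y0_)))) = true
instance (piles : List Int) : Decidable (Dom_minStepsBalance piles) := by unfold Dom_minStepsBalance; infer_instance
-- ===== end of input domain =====

-- B drops the sort and the rank-count list: it sums, for each element p of piles, the number of
-- distinct values strictly below p (objective: simpler — a direct double sum, no sort, no count list).


-- ===== PORT A =====
def minStepsBalance (piles : List Int) : Int :=
  let sorted_unique_piles := PySem.List.sorted (PySem.Set.ofList piles) (fun x => x) true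
  let piles_count :=
    sorted_unique_piles.foldl (fun acc p => acc ++ [(PySem.List.count piles p : Int)]) []
  let last_index : Int := (sorted_unique_piles.length : Int) - 1
  (PySem.List.pyRange 0 last_index 1).foldl
    (fun answer i => answer + PySem.List.pyGetD piles_count i 0 * (last_index - i)) 0

-- ===== PORT B =====
def minStepsBalance_alt (piles : List Int) : Int :=
  let distinct := PySem.Set.ofList piles
  piles.foldl (fun acc p => distinct.foldl (fun acc q => if q < p then acc + 1 else acc) acc) 0

-- ===== PRECONDITION & SPEC =====
def Spec_minStepsBalance (piles : List Int) (out : Int) : Prop := out = minStepsBalance_alt piles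
instance (piles : List Int) (out : Int) : Decidable (Spec_minStepsBalance piles out) := by unfold Spec_minStepsBalance; infer_instance

-- ===== CLAIM =====
def Claim_equal_minStepsBalance : Prop := ∀ (piles : List Int), Dom_minStepsBalance piles → Spec_minStepsBalance piles (minStepsBalance piles)

-- ===== LEMMAS AND PROOFS =====

/-- The value A's loop computes over the counts list `cs` (front to back):
each count is weighted by the number of elements after it. -/
def pvWeighted : List Int → Int
  | [] => 0
  | c :: r => c * (r.length : Int) + pvWeighted r

/-- A's weighted sum over indices `0 .. len-2`, in closed form. -/
lemma pvA_sum (cs : List Int) :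
    ((List.range (cs.length - 1)).map
        (fun k => cs.getD k 0 * ((cs.length : Int) - 1 - (k : Int)))).sum
      = pvWeighted cs := by
  induction cs with
  | nil => simp [pvWeighted]
  | cons c r ih =>
      cases r with
      | nil => simp [pvWeighted]
      | cons c' r' =>
          simp only [List.length_cons, Nat.add_sub_cancel] at ih ⊢
          rw [List.range_succ_eq_map]
          simp only [List.map_cons, List.map_map, List.sum_cons]
          have h1 : ((List.range r'.length).map
              ((fun k : Nat => (c :: c' :: r').getD k 0 * (((r'.length + 1 + 1 : Nat) : Int) - 1 - (k : Int))) ∘ Nat.succ)).sum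
              = ((List.range r'.length).map
              (fun k : Nat => (c' :: r').getD k 0 * (((r'.length + 1 : Nat) : Int) - 1 - (k : Int)))).sum := by
            apply congrArg List.sum
            apply List.map_congr_left
            intro k _
            simp only [Function.comp_apply, List.getD_cons_succ]
            push_cast
            ring_nf
          rw [h1, ih]
          simp only [pvWeighted, List.getD_cons_zero, List.length_cons]
          push_cast
          ring

/-- A's pyRange fold is exactly that weighted sum. -/
lemma pvA_range (cs : List Int) :
    (PySem.List.pyRange 0 ((cs.length : Int) - 1) 1).foldl
        (fun answer i => answer + PySem.List.pyGetD cs i 0 * ((cs.length : Int) - 1 - i)) 0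
      = pvWeighted cs := by
  rw [PySem.List.foldl_add, PySem.List.pyRange_one, List.map_map, zero_add]
  have hlen : (((cs.length : Int) - 1 - 0).toNat) = cs.length - 1 := by omega
  rw [hlen]
  trans ((List.range (cs.length - 1)).map
      (fun k => cs.getD k 0 * ((cs.length : Int) - 1 - (k : Int)))).sum
  · apply congrArg List.sum
    apply List.map_congr_left
    intro k _
    simp only [Function.comp_apply, zero_add, PySem.List.pyGetD_natCast]
  · exact pvA_sum cs

/-- On a strictly decreasing list, the positional weight (# elements after v)
is the number of elements of the whole list below v. -/
lemma pvWeighted_eq_countP (su : List Int) (hp : su.Pairwise (· > ·)) (cnt : Int → Int) :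
    pvWeighted (su.map cnt)
      = (su.map (fun v => cnt v * (su.countP (fun q => decide (q < v)) : Int))).sum := by
  induction su with
  | nil => simp [pvWeighted]
  | cons h t ih =>
      rcases List.pairwise_cons.mp hp with ⟨hall, hpt⟩
      simp only [List.map_cons, pvWeighted, List.sum_cons, List.length_map]
      have hhead : (h :: t).countP (fun q => decide (q < h)) = t.length := by
        rw [List.countP_cons,
          List.countP_eq_length.mpr (by intro q hq; simpa using hall q hq)]
        simp
      have htail : (t.map (fun v => cnt v * ((h :: t).countP (fun q => decide (q < v)) : Int))).sum
          = (t.map (fun v => cnt v * (t.countP (fun q => decide (q < v)) : Int))).sum := by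
        apply congrArg List.sum
        apply List.map_congr_left
        intro v hv
        have : ¬ (h < v) := by have := hall v hv; omega
        simp [this]
      rw [hhead, htail, ih hpt]

/-- Regrouping: a per-distinct-value sum weighted by multiplicities equals the per-element sum. -/
lemma pvRegroup (piles su : List Int) (hnd : su.Nodup) (hmem : ∀ x, x ∈ su ↔ x ∈ piles)
    (f : Int → Int) :
    (su.map (fun v => (piles.count v : Int) * f v)).sum = (piles.map f).sum := by
  have h1 : (su.map (fun v => (piles.count v : Int) * f v)).sum
      = ∑ v ∈ su.toFinset, (piles.count v : Int) * f v := by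
    rw [List.sum_toFinset _ hnd]
  have h2 : su.toFinset = piles.toFinset := by
    ext x; simp [List.mem_toFinset, hmem]
  have h3 : ∑ v ∈ piles.toFinset, (piles.count v : Int) * f v = (piles.map f).sum := by
    simpa using (Finset.sum_multiset_map_count (piles : Multiset Int) f).symm
  rw [h1, h2, h3]

theorem minStepsBalance_eq (piles : List Int) : minStepsBalance piles = minStepsBalance_alt piles := by
  simp only [minStepsBalance, minStepsBalance_alt]
  rw [PySem.List.foldl_append_singleton_eq_map]
  set su := PySem.List.sorted (PySem.Set.ofList piles) (fun x => x) true with hsu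
  -- A's side: weighted sum over the counts list
  have hlen : ((su.length : Int) - 1) = (((su.map (fun p => ((PySem.List.count piles p : Nat) : Int))).length : Int) - 1) := by simp
  simp only [List.nil_append]
  rw [hlen, pvA_range]
  -- strictly decreasing order of su
  have hnodup : su.Nodup := (PySem.List.sorted_perm _ _ _).nodup_iff.mpr (PySem.Set.nodup_ofList piles)
  have hpw : su.Pairwise (· > ·) := by
    have h1 : su.Pairwise (fun a b => b ≤ a) := PySem.List.sorted_pairwise_rev _ _
    have hne : su.Pairwise (· ≠ ·) := hnodup
    exact (List.Pairwise.and h1 hne).imp (fun ⟨hle, hne⟩ => lt_of_le_of_ne hle (Ne.symm hne))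
  have hmem : ∀ x, x ∈ su ↔ x ∈ piles := by
    intro x
    rw [hsu, PySem.List.mem_sorted, PySem.Set.mem_ofList]
  -- rewrite A's value as the per-element sum
  rw [pvWeighted_eq_countP su hpw]
  have hcnt : (su.map (fun v => ((PySem.List.count piles v : Nat) : Int) * (su.countP (fun q => decide (q < v)) : Int))).sum
      = (piles.map (fun p => (su.countP (fun q => decide (q < p)) : Int))).sum := by
    have := pvRegroup piles su hnodup hmem (fun p => (su.countP (fun q => decide (q < p)) : Int))
    simpa [PySem.List.count] using this
  rw [hcnt]
  -- B's side: the nested fold is the same per-element sum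
  have hB : ∀ (l : List Int) (a : Int),
      l.foldl (fun acc p => (PySem.Set.ofList piles).foldl (fun acc q => if q < p then acc + 1 else acc) acc) a
        = a + (l.map (fun p => ((PySem.Set.ofList piles).countP (fun q => decide (q < p)) : Int))).sum := by
    intro l
    induction l with
    | nil => intro a; simp
    | cons p r ih =>
        intro a
        simp only [List.foldl_cons, List.map_cons, List.sum_cons]
        rw [PySem.List.foldl_ite_add_one, ih]
        ring
  rw [hB piles 0, zero_add]
  -- countP over su = countP over the distinct list (permutation)
  apply congrArg List.sum
  apply List.map_congr_left
  intro p _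
  congr 1
  exact congrArg Nat.cast ((PySem.List.sorted_perm _ _ _).countP_eq _)

-- ===== VERDICT =====
theorem minStepsBalance_spec : Claim_equal_minStepsBalance := by
  intro piles _
  unfold Spec_minStepsBalance
  exact minStepsBalance_eq piles
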